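-- pv_equiv track=rewrite | github.com/Shagwu/crewai-demo | crewai-backend/mindful-crew/tauri_backend.py | extract_blog_title
-- ===== SOURCE A (Python) =====
-- def extract_blog_title(content: str, fallback: str) -> str:
--     try:
--         for line in content.splitlines():
--             stripped = line.strip().lstrip("\ufeff")  # handle BOM
--             if stripped.startswith("# "):
--                 return stripped[2:].strip() or fallback
--         # fallback to first non-empty line
--         for line in content.splitlines():
--             if line.strip():
--                 return line.strip()[:120]
--     except Exception:
--         pass
--     return fallback
-- ===== SOURCE B (Python) =====
-- def extract_blog_title(content: str, fallback: str) -> str: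
--     # One pass over splitlines(): return at the first H1; remember the first
--     # non-empty line as a candidate for the no-H1 case.
--     try:
--         first_nonempty = None
--         for line in content.splitlines():
--             stripped = line.strip().lstrip("\ufeff")  # handle BOM
--             if stripped.startswith("# "):
--                 return stripped[2:].strip() or fallback
--             if first_nonempty is None:
--                 s = line.strip()
--                 if s:
--                     first_nonempty = s
--         if first_nonempty is not None:
--             return first_nonempty[:120]
--     except Exception:
--         pass
--     return fallback
-- ===== Notes on version B (the rewrite author's own statement) =====
-- stated objective: alternative
-- what changed: A scans splitlines() twice (first for an H1 line, then again for the first non-empty line); B makes a single pass that returns at the first H1 while remembering the first non-empty line as the fallback candidate.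
import Mathlib
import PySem

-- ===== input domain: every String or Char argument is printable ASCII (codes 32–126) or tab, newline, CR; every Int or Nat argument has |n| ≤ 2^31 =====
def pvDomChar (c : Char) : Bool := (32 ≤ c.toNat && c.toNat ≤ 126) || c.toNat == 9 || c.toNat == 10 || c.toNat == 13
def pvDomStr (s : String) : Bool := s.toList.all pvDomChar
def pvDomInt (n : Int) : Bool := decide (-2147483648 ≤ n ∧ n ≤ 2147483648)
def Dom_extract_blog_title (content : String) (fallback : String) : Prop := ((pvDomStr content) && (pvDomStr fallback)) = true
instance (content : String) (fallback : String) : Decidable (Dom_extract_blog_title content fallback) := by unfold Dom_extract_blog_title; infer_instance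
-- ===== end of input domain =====

-- B merges A's two scans of content.splitlines() into a single pass that
-- remembers the first non-empty line while looking for the first H1 (alternative decomposition).
-- No try/except path is reachable on str inputs, so both ports are total.

-- s.lstrip("\ufeff"): drop leading U+FEFF chars (exact: Python lstrip(chars) drops leading chars of the set)
def pyLstripBOM (s : String) : String := String.ofList (s.toList.dropWhile (· == '\ufeff'))

-- ===== PORT A =====
-- first loop: first line whose stripped form starts with "# " → its title text (or fallback if empty)
def aH1Loop (fallback : String) : List String → Option String
  | [] => none
  | line :: rest =>
    let stripped := pyLstripBOM (PySem.Str.strip line)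
    if PySem.Str.startswith stripped "# " then
      some (let t := PySem.Str.strip (PySem.Str.slice stripped (some 2) none)
            if t = "" then fallback else t)   -- 'or fallback'
    else aH1Loop fallback rest

-- second loop: first non-empty line, stripped and cut to 120 chars
def aFirstNonemptyLoop : List String → Option String
  | [] => none
  | line :: rest =>
    if PySem.Str.strip line ≠ "" then some (PySem.Str.slice (PySem.Str.strip line) none (some 120))
    else aFirstNonemptyLoop rest

def extract_blog_title (content : String) (fallback : String) : String :=
  let lines := PySem.Str.splitlines content
  match aH1Loop fallback lines with
  | some r => r
  | none =>
    match aFirstNonemptyLoop lines with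
    | some r => r
    | none => fallback

-- ===== PORT B =====
-- single pass, carrying the first non-empty line seen so far
def bLoop (fallback : String) : List String → Option String → String
  | [], first_nonempty =>
    match first_nonempty with
    | some s => PySem.Str.slice s none (some 120)
    | none => fallback
  | line :: rest, first_nonempty =>
    let stripped := pyLstripBOM (PySem.Str.strip line)
    if PySem.Str.startswith stripped "# " then
      let t := PySem.Str.strip (PySem.Str.slice stripped (some 2) none)
      if t = "" then fallback else t
    else
      match first_nonempty with
      | some s => bLoop fallback rest (some s)
      | none =>
        let s := PySem.Str.strip line
        if s ≠ "" then bLoop fallback rest (some s) else bLoop fallback rest none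

def extract_blog_title_alt (content : String) (fallback : String) : String :=
  bLoop fallback (PySem.Str.splitlines content) none

-- ===== PRECONDITION & SPEC =====
def Spec_extract_blog_title (content : String) (fallback : String) (out : String) : Prop := out = extract_blog_title_alt content fallback
instance (content : String) (fallback : String) (out : String) : Decidable (Spec_extract_blog_title content fallback out) := by unfold Spec_extract_blog_title; infer_instance

-- ===== CLAIM (what is proved, stated in full; the proofs are below) =====
def Claim_equal_extract_blog_title : Prop := ∀ (content : String) (fallback : String), Dom_extract_blog_title content fallback → Spec_extract_blog_title content fallback (extract_blog_title content fallback)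

-- ===== LEMMAS AND PROOFS =====

-- loop invariant: one pass = (first loop, then acc if set, else second loop)
theorem bLoop_eq (fallback : String) (lines : List String) :
    ∀ acc : Option String,
      bLoop fallback lines acc =
        match aH1Loop fallback lines with
        | some r => r
        | none =>
          match acc with
          | some s => PySem.Str.slice s none (some 120)
          | none =>
            match aFirstNonemptyLoop lines with
            | some r => r
            | none => fallback := by
  induction lines with
  | nil => intro acc; cases acc <;> rfl
  | cons line rest ih =>
    intro acc
    simp only [bLoop, aH1Loop, aFirstNonemptyLoop]
    by_cases h : PySem.Chars.startswith (pyLstripBOM (PySem.Str.strip line)).toList ['#', ' '] = true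
    · simp [h]
    · cases acc with
      | some s => simp [h, ih]
      | none =>
        by_cases hs : PySem.Str.strip line = ""
        · rw [hs] at h; simp [h, hs, ih]
        · simp [h, hs, ih]

-- ===== VERDICT (by name: the statement is the Claim_ definition above) =====
theorem extract_blog_title_spec : Claim_equal_extract_blog_title := by
  intro content fallback _
  unfold Spec_extract_blog_title extract_blog_title extract_blog_title_alt
  rw [bLoop_eq]
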